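-- pv_equiv track=rewrite | github.com/NikoriakViktot/model-runtime | scripts/check_flaky.py | detect_flaky
-- ===== SOURCE A (Python) =====
-- def detect_flaky(run_results: list[dict[str, str]]) -> list[str]:
--     """
--     Return a list of test node IDs that have inconsistent outcomes across runs.
--     A test is flaky if it both passed in at least one run and failed in another.
--     """
--     all_nodeids: set[str] = set()
--     for results in run_results:
--         all_nodeids.update(results.keys())
--
--     flaky: list[str] = []
--     for nodeid in sorted(all_nodeids):
--         outcomes = {results.get(nodeid) for results in run_results if nodeid in results}
--         # Flaky = has both passing and failing outcomes
--         if "passed" in outcomes and "failed" in outcomes: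
--             flaky.append(nodeid)
--
--     return flaky
-- ===== SOURCE B (Python) =====
-- def detect_flaky(run_results: list[dict[str, str]]) -> list[str]:
--     """
--     Return a list of test node IDs that have inconsistent outcomes across runs.
--     A test is flaky if it both passed in at least one run and failed in another.
--     """
--     passed: set[str] = set()
--     failed: set[str] = set()
--     for results in run_results:
--         for nodeid, outcome in results.items():
--             if outcome == "passed":
--                 passed.add(nodeid)
--             elif outcome == "failed":
--                 failed.add(nodeid)
--     return sorted(passed & failed)
-- ===== Notes on version B (the rewrite author's own statement) =====
-- stated objective: faster
-- what changed: Instead of collecting all nodeids and then re-scanning every run per sorted nodeid to rebuild its outcome set, B makes one pass over all run entries building a passed-set and a failed-set and returns sorted(passed & failed).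
import Mathlib
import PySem

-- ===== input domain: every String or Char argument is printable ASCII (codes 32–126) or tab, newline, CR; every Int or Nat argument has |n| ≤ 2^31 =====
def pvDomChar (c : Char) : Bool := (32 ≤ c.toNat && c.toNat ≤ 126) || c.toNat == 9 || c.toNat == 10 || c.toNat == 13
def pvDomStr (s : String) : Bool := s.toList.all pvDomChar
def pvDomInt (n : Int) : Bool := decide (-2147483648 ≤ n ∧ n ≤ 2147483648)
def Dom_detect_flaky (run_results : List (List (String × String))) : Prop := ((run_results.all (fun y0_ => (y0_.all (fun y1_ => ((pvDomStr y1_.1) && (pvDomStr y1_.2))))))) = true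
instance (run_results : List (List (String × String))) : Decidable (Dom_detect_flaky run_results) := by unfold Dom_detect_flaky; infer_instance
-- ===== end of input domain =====

-- B replaces A's per-nodeid rescan of every run by one pass building passed/failed
-- sets and a set intersection (objective: faster; a timing run measured it). Neither function mutates its argument.

-- ===== PORT A =====
def detect_flaky (run_results : List (List (String × String))) : List String :=
  let all_nodeids : PySem.Set String :=
    run_results.foldl (fun s results => PySem.Set.update s (PySem.Dict.keys (PySem.Dict.mk results))) PySem.Set.empty
  (PySem.List.sorted all_nodeids (fun x => x) false).foldl
    (fun flaky nodeid =>
      let outcomes : PySem.Set (Option String) :=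
        PySem.Set.ofList ((run_results.filter (fun results => PySem.Dict.contains (PySem.Dict.mk results) nodeid)).map
          (fun results => PySem.Dict.get? (PySem.Dict.mk results) nodeid))
      if PySem.Set.contains outcomes (some "passed") && PySem.Set.contains outcomes (some "failed")
      then flaky ++ [nodeid] else flaky) []

-- ===== PORT B =====
def detect_flaky_alt (run_results : List (List (String × String))) : List String :=
  let pf : PySem.Set String × PySem.Set String :=
    run_results.foldl
      (fun pf results =>
        (PySem.Dict.items (PySem.Dict.mk results)).foldl
          (fun (pf : PySem.Set String × PySem.Set String) kv =>
            if kv.2 == "passed" then (PySem.Set.add pf.1 kv.1, pf.2)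
            else if kv.2 == "failed" then (pf.1, PySem.Set.add pf.2 kv.1)
            else pf) pf)
      (PySem.Set.empty, PySem.Set.empty)
  PySem.List.sorted (PySem.Set.inter pf.1 pf.2) (fun x => x) false

-- ===== PRECONDITION & SPEC =====
-- Pre_ excludes association lists with duplicate keys inside one run: a Python dict
-- cannot hold duplicate keys, so such Lean inputs encode no Python input and A's
-- first-match lookup versus B's full item scan diverge only there.
def Pre_detect_flaky (run_results : List (List (String × String))) : Prop :=
  ∀ results ∈ run_results, (results.map Prod.fst).Nodup
instance (run_results : List (List (String × String))) : Decidable (Pre_detect_flaky run_results) := by unfold Pre_detect_flaky; infer_instance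

def pvWitness_detect_flaky : (List (List (String × String))) :=
  [[("t1", "passed"), ("t2", "failed")], [("t1", "failed")]]

def Spec_detect_flaky (run_results : List (List (String × String))) (out : List String) : Prop := out = detect_flaky_alt run_results
instance (run_results : List (List (String × String))) (out : List String) : Decidable (Spec_detect_flaky run_results out) := by unfold Spec_detect_flaky; infer_instance

-- ===== CLAIM (what is proved, stated in full; the proofs are below) =====
def Claim_equal_detect_flaky : Prop := ∀ (run_results : List (List (String × String))), Dom_detect_flaky run_results → Pre_detect_flaky run_results → Spec_detect_flaky run_results (detect_flaky run_results)

-- ===== LEMMAS AND PROOFS =====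

-- A's accumulating loop over the sorted nodeids is a filter.
theorem aLoop_eq_filter (rr : List (List (String × String))) (l : List String) :
    l.foldl
      (fun flaky nodeid =>
        if PySem.Set.contains (PySem.Set.ofList ((rr.filter (fun results => PySem.Dict.contains (PySem.Dict.mk results) nodeid)).map
              (fun results => PySem.Dict.get? (PySem.Dict.mk results) nodeid))) (some "passed") &&
           PySem.Set.contains (PySem.Set.ofList ((rr.filter (fun results => PySem.Dict.contains (PySem.Dict.mk results) nodeid)).map
              (fun results => PySem.Dict.get? (PySem.Dict.mk results) nodeid))) (some "failed")
        then flaky ++ [nodeid] else flaky) [] =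
    l.filter (fun nodeid =>
        PySem.Set.contains (PySem.Set.ofList ((rr.filter (fun results => PySem.Dict.contains (PySem.Dict.mk results) nodeid)).map
              (fun results => PySem.Dict.get? (PySem.Dict.mk results) nodeid))) (some "passed") &&
        PySem.Set.contains (PySem.Set.ofList ((rr.filter (fun results => PySem.Dict.contains (PySem.Dict.mk results) nodeid)).map
              (fun results => PySem.Dict.get? (PySem.Dict.mk results) nodeid))) (some "failed")) := by
  have h := PySem.List.foldl_append_if_eq_filter
    (fun nodeid =>
        PySem.Set.contains (PySem.Set.ofList ((rr.filter (fun results => PySem.Dict.contains (PySem.Dict.mk results) nodeid)).map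
              (fun results => PySem.Dict.get? (PySem.Dict.mk results) nodeid))) (some "passed") &&
        PySem.Set.contains (PySem.Set.ofList ((rr.filter (fun results => PySem.Dict.contains (PySem.Dict.mk results) nodeid)).map
              (fun results => PySem.Dict.get? (PySem.Dict.mk results) nodeid))) (some "failed")) l ([] : List String)
  rw [List.nil_append] at h
  exact h

-- A's accumulated nodeid set: nodup and membership.
theorem aAll_spec (rr : List (List (String × String))) (s : PySem.Set String) (hs : s.Nodup) :
    (rr.foldl (fun s results => PySem.Set.update s (PySem.Dict.keys (PySem.Dict.mk results))) s).Nodup ∧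
    ∀ x, x ∈ rr.foldl (fun s results => PySem.Set.update s (PySem.Dict.keys (PySem.Dict.mk results))) s ↔
      x ∈ s ∨ ∃ r ∈ rr, x ∈ r.map Prod.fst := by
  induction rr generalizing s with
  | nil => simpa using hs
  | cons r rr ih =>
    simp only [List.foldl_cons]
    obtain ⟨hnd, hmem⟩ := ih (PySem.Set.update s (PySem.Dict.keys (PySem.Dict.mk r))) (PySem.Set.nodup_update _ _ hs)
    refine ⟨hnd, fun x => ?_⟩
    rw [hmem x, PySem.Set.mem_update]
    constructor
    · rintro ((h | h) | ⟨r', hr', hx⟩)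
      · exact Or.inl h
      · exact Or.inr ⟨r, List.mem_cons_self .., h⟩
      · exact Or.inr ⟨r', List.mem_cons_of_mem _ hr', hx⟩
    · rintro (h | ⟨r', hr', hx⟩)
      · exact Or.inl (Or.inl h)
      · rcases List.mem_cons.mp hr' with rfl | hr'
        · exact Or.inl (Or.inr hx)
        · exact Or.inr ⟨r', hr', hx⟩

-- B's inner loop over one run's items.
theorem bInner_spec (r : List (String × String)) (pf : PySem.Set String × PySem.Set String)
    (h1 : pf.1.Nodup) (h2 : pf.2.Nodup) :
    ((r.foldl (fun (pf : PySem.Set String × PySem.Set String) kv =>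
        if kv.2 == "passed" then (PySem.Set.add pf.1 kv.1, pf.2)
        else if kv.2 == "failed" then (pf.1, PySem.Set.add pf.2 kv.1)
        else pf) pf).1.Nodup ∧
     (r.foldl (fun (pf : PySem.Set String × PySem.Set String) kv =>
        if kv.2 == "passed" then (PySem.Set.add pf.1 kv.1, pf.2)
        else if kv.2 == "failed" then (pf.1, PySem.Set.add pf.2 kv.1)
        else pf) pf).2.Nodup) ∧
    ∀ x, (x ∈ (r.foldl (fun (pf : PySem.Set String × PySem.Set String) kv =>
        if kv.2 == "passed" then (PySem.Set.add pf.1 kv.1, pf.2)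
        else if kv.2 == "failed" then (pf.1, PySem.Set.add pf.2 kv.1)
        else pf) pf).1 ↔ x ∈ pf.1 ∨ (x, "passed") ∈ r) ∧
      (x ∈ (r.foldl (fun (pf : PySem.Set String × PySem.Set String) kv =>
        if kv.2 == "passed" then (PySem.Set.add pf.1 kv.1, pf.2)
        else if kv.2 == "failed" then (pf.1, PySem.Set.add pf.2 kv.1)
        else pf) pf).2 ↔ x ∈ pf.2 ∨ (x, "failed") ∈ r) := by
  induction r generalizing pf with
  | nil => simp [h1, h2]
  | cons kv r ih =>
    obtain ⟨k, v⟩ := kv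
    simp only [List.foldl_cons]
    by_cases hp : v = "passed"
    · subst hp
      rw [show ((if (("passed" : String) == "passed") = true then (PySem.Set.add pf.1 k, pf.2)
            else if (("passed" : String) == "failed") = true then (pf.1, PySem.Set.add pf.2 k) else pf) : PySem.Set String × PySem.Set String) = (PySem.Set.add pf.1 k, pf.2) by simp]
      obtain ⟨⟨n1, n2⟩, hm⟩ := ih (PySem.Set.add pf.1 k, pf.2) (PySem.Set.nodup_add _ _ h1) h2
      refine ⟨⟨n1, n2⟩, fun x => ?_⟩
      obtain ⟨hm1, hm2⟩ := hm x
      refine ⟨?_, ?_⟩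
      · rw [hm1]
        simp only [PySem.Set.mem_add, List.mem_cons, Prod.mk.injEq]
        constructor
        · rintro ((h | h) | h)
          · exact Or.inl h
          · exact Or.inr (Or.inl (by simp [h]))
          · exact Or.inr (Or.inr h)
        · rintro (h | h | h)
          · exact Or.inl (Or.inl h)
          · exact Or.inl (Or.inr h.1)
          · exact Or.inr h
      · rw [hm2]
        constructor
        · rintro (h | h)
          · exact Or.inl h
          · exact Or.inr (List.mem_cons_of_mem _ h)
        · rintro (h | h)
          · exact Or.inl h
          · rcases List.mem_cons.mp h with heq | h2
            · rw [Prod.mk.injEq] at heq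
              exact absurd heq.2.symm (by decide)
            · exact Or.inr h2
    · by_cases hf : v = "failed"
      · subst hf
        rw [show ((if (("failed" : String) == "passed") = true then (PySem.Set.add pf.1 k, pf.2)
              else if (("failed" : String) == "failed") = true then (pf.1, PySem.Set.add pf.2 k) else pf) : PySem.Set String × PySem.Set String) = (pf.1, PySem.Set.add pf.2 k) by simp]
        obtain ⟨⟨n1, n2⟩, hm⟩ := ih (pf.1, PySem.Set.add pf.2 k) h1 (PySem.Set.nodup_add _ _ h2)
        refine ⟨⟨n1, n2⟩, fun x => ?_⟩
        obtain ⟨hm1, hm2⟩ := hm x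
        refine ⟨?_, ?_⟩
        · rw [hm1]
          constructor
          · rintro (h | h)
            · exact Or.inl h
            · exact Or.inr (List.mem_cons_of_mem _ h)
          · rintro (h | h)
            · exact Or.inl h
            · rcases List.mem_cons.mp h with heq | h2
              · rw [Prod.mk.injEq] at heq
                exact absurd heq.2.symm (by decide)
              · exact Or.inr h2
        · rw [hm2]
          simp only [PySem.Set.mem_add, List.mem_cons, Prod.mk.injEq]
          constructor
          · rintro ((h | h) | h)
            · exact Or.inl h
            · exact Or.inr (Or.inl (by simp [h]))
            · exact Or.inr (Or.inr h)
          · rintro (h | h | h)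
            · exact Or.inl (Or.inl h)
            · exact Or.inl (Or.inr h.1)
            · exact Or.inr h
      · rw [show ((if (v == "passed") = true then (PySem.Set.add pf.1 k, pf.2)
              else if (v == "failed") = true then (pf.1, PySem.Set.add pf.2 k) else pf) : PySem.Set String × PySem.Set String) = pf by simp [hp, hf]]
        obtain ⟨⟨n1, n2⟩, hm⟩ := ih pf h1 h2
        refine ⟨⟨n1, n2⟩, fun x => ?_⟩
        obtain ⟨hm1, hm2⟩ := hm x
        refine ⟨?_, ?_⟩
        · rw [hm1]
          constructor
          · rintro (h | h)
            · exact Or.inl h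
            · exact Or.inr (List.mem_cons_of_mem _ h)
          · rintro (h | h)
            · exact Or.inl h
            · rcases List.mem_cons.mp h with heq | h2
              · rw [Prod.mk.injEq] at heq
                exact absurd heq.2.symm hp
              · exact Or.inr h2
        · rw [hm2]
          constructor
          · rintro (h | h)
            · exact Or.inl h
            · exact Or.inr (List.mem_cons_of_mem _ h)
          · rintro (h | h)
            · exact Or.inl h
            · rcases List.mem_cons.mp h with heq | h2
              · rw [Prod.mk.injEq] at heq
                exact absurd heq.2.symm hf
              · exact Or.inr h2

-- B's outer loop over the runs.
theorem bOuter_spec (rr : List (List (String × String))) (pf : PySem.Set String × PySem.Set String)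
    (h1 : pf.1.Nodup) (h2 : pf.2.Nodup) :
    ((rr.foldl (fun pf results =>
        (PySem.Dict.items (PySem.Dict.mk results)).foldl
          (fun (pf : PySem.Set String × PySem.Set String) kv =>
            if kv.2 == "passed" then (PySem.Set.add pf.1 kv.1, pf.2)
            else if kv.2 == "failed" then (pf.1, PySem.Set.add pf.2 kv.1)
            else pf) pf) pf).1.Nodup ∧
     (rr.foldl (fun pf results =>
        (PySem.Dict.items (PySem.Dict.mk results)).foldl
          (fun (pf : PySem.Set String × PySem.Set String) kv =>
            if kv.2 == "passed" then (PySem.Set.add pf.1 kv.1, pf.2)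
            else if kv.2 == "failed" then (pf.1, PySem.Set.add pf.2 kv.1)
            else pf) pf) pf).2.Nodup) ∧
    ∀ x, (x ∈ (rr.foldl (fun pf results =>
        (PySem.Dict.items (PySem.Dict.mk results)).foldl
          (fun (pf : PySem.Set String × PySem.Set String) kv =>
            if kv.2 == "passed" then (PySem.Set.add pf.1 kv.1, pf.2)
            else if kv.2 == "failed" then (pf.1, PySem.Set.add pf.2 kv.1)
            else pf) pf) pf).1 ↔ x ∈ pf.1 ∨ ∃ r ∈ rr, (x, "passed") ∈ r) ∧
      (x ∈ (rr.foldl (fun pf results =>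
        (PySem.Dict.items (PySem.Dict.mk results)).foldl
          (fun (pf : PySem.Set String × PySem.Set String) kv =>
            if kv.2 == "passed" then (PySem.Set.add pf.1 kv.1, pf.2)
            else if kv.2 == "failed" then (pf.1, PySem.Set.add pf.2 kv.1)
            else pf) pf) pf).2 ↔ x ∈ pf.2 ∨ ∃ r ∈ rr, (x, "failed") ∈ r) := by
  induction rr generalizing pf with
  | nil => simp [h1, h2]
  | cons r rr ih =>
    simp only [List.foldl_cons]
    obtain ⟨⟨n1, n2⟩, hmr⟩ := bInner_spec r pf h1 h2
    obtain ⟨hnd, hm⟩ := ih _ n1 n2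
    refine ⟨hnd, fun x => ?_⟩
    obtain ⟨hm1, hm2⟩ := hm x
    obtain ⟨hr1, hr2⟩ := hmr x
    constructor
    · rw [hm1, hr1]
      constructor
      · rintro ((h | h) | ⟨r', hr', hx⟩)
        · exact Or.inl h
        · exact Or.inr ⟨r, List.mem_cons_self .., h⟩
        · exact Or.inr ⟨r', List.mem_cons_of_mem _ hr', hx⟩
      · rintro (h | ⟨r', hr', hx⟩)
        · exact Or.inl (Or.inl h)
        · rcases List.mem_cons.mp hr' with rfl | hr'
          · exact Or.inl (Or.inr hx)
          · exact Or.inr ⟨r', hr', hx⟩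
    · rw [hm2, hr2]
      constructor
      · rintro ((h | h) | ⟨r', hr', hx⟩)
        · exact Or.inl h
        · exact Or.inr ⟨r, List.mem_cons_self .., h⟩
        · exact Or.inr ⟨r', List.mem_cons_of_mem _ hr', hx⟩
      · rintro (h | ⟨r', hr', hx⟩)
        · exact Or.inl (Or.inl h)
        · rcases List.mem_cons.mp hr' with rfl | hr'
          · exact Or.inl (Or.inr hx)
          · exact Or.inr ⟨r', hr', hx⟩

-- With unique keys in a run, A's first-match lookup finds exactly the pairs of the run.
theorem get?_mk_iff (r : List (String × String)) (h : (r.map Prod.fst).Nodup) (x v : String) :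
    PySem.Dict.get? (PySem.Dict.mk r) x = some v ↔ (x, v) ∈ r := by
  have hnd : (PySem.Dict.mk r).keys.Nodup := by simpa [PySem.Dict.keys] using h
  exact PySem.Dict.get?_eq_some_iff_mem_items _ _ _ hnd

-- A's flakiness test for one nodeid, characterised.
theorem cond_iff (rr : List (List (String × String))) (hpre : ∀ results ∈ rr, (results.map Prod.fst).Nodup)
    (x : String) :
    (PySem.Set.contains (PySem.Set.ofList ((rr.filter (fun results => PySem.Dict.contains (PySem.Dict.mk results) x)).map
        (fun results => PySem.Dict.get? (PySem.Dict.mk results) x))) (some "passed") &&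
     PySem.Set.contains (PySem.Set.ofList ((rr.filter (fun results => PySem.Dict.contains (PySem.Dict.mk results) x)).map
        (fun results => PySem.Dict.get? (PySem.Dict.mk results) x))) (some "failed")) = true ↔
    (∃ r ∈ rr, (x, "passed") ∈ r) ∧ ∃ r ∈ rr, (x, "failed") ∈ r := by
  rw [Bool.and_eq_true]
  have key : ∀ v : String, PySem.Set.contains (PySem.Set.ofList ((rr.filter (fun results => PySem.Dict.contains (PySem.Dict.mk results) x)).map
      (fun results => PySem.Dict.get? (PySem.Dict.mk results) x))) (some v) = true ↔ ∃ r ∈ rr, (x, v) ∈ r := by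
    intro v
    rw [PySem.Set.contains_iff, PySem.Set.mem_ofList, List.mem_map]
    constructor
    · rintro ⟨r, hr, hget⟩
      rw [List.mem_filter] at hr
      exact ⟨r, hr.1, (get?_mk_iff r (hpre r hr.1) x v).mp hget⟩
    · rintro ⟨r, hr, hx⟩
      have hget : PySem.Dict.get? (PySem.Dict.mk r) x = some v := (get?_mk_iff r (hpre r hr) x v).mpr hx
      refine ⟨r, List.mem_filter.mpr ⟨hr, ?_⟩, hget⟩
      rw [PySem.Dict.contains_eq_isSome_get?, hget]
      rfl
  rw [key "passed", key "failed"]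

-- ===== VERDICT (by name: the statement is the Claim_ definition above) =====
theorem detect_flaky_spec : Claim_equal_detect_flaky := by
  intro rr _ hpre
  simp only [Spec_detect_flaky, detect_flaky, detect_flaky_alt]
  rw [aLoop_eq_filter]
  obtain ⟨hallnd, hallmem⟩ := aAll_spec rr PySem.Set.empty (by simp [PySem.Set.empty])
  obtain ⟨⟨hp1, hp2⟩, hbm⟩ := bOuter_spec rr (PySem.Set.empty, PySem.Set.empty) (by simp [PySem.Set.empty]) (by simp [PySem.Set.empty])
  set allS := rr.foldl (fun s results => PySem.Set.update s (PySem.Dict.keys (PySem.Dict.mk results))) PySem.Set.empty with hall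
  have hsortnd : (PySem.List.sorted allS (fun x => x) false).Nodup :=
    ((PySem.List.sorted_perm allS (fun x => x) false).nodup_iff).mpr hallnd
  have hsortlt : (PySem.List.sorted allS (fun x => x) false).Pairwise (· < ·) := by
    have hle := PySem.List.sorted_pairwise allS (fun x => x)
    exact (List.Pairwise.and hle hsortnd).imp (fun h => lt_of_le_of_ne h.1 h.2)
  refine (PySem.List.sorted_eq_of_perm_of_pairwise_lt _ _ _ ?_ ?_).symm
  · refine (List.perm_ext_iff_of_nodup (hsortnd.filter _) (PySem.Set.nodup_inter _ _ hp1)).mpr ?_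
    intro x
    rw [List.mem_filter, PySem.List.mem_sorted, PySem.Set.mem_inter, hallmem x, cond_iff rr hpre x]
    obtain ⟨hb1, hb2⟩ := hbm x
    rw [hb1, hb2]
    simp only [PySem.Set.empty, List.not_mem_nil, false_or]
    constructor
    · rintro ⟨-, hP, hF⟩
      exact ⟨hP, hF⟩
    · rintro ⟨⟨r, hr, hx⟩, hF⟩
      exact ⟨⟨r, hr, List.mem_map.mpr ⟨(x, "passed"), hx, rfl⟩⟩, ⟨r, hr, hx⟩, hF⟩
  · exact hsortlt.filter _
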